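-- pv_equiv track=rewrite | github.com/kvuklazk/advent_of_code_2021 | 15/15_main.py | safest_pos
-- ===== SOURCE A (Python) =====
-- highest_risk = 0
--
-- def safest_pos(field_: list = None, pos_y: int = 0, pos_x: int = 0, forbid_pos: list = None):
--     lowest_risk = [[highest_risk, 0, 0]]
--
--     index_list_y = [0, 1, -1, 0]
--     index_list_x = [1, 0, 0, -1]
--
--     for i in range(len(index_list_y)):
--         if field_[pos_y + index_list_y[i]][pos_x + index_list_x[i]] < lowest_risk[0][0]:
--             lowest_risk = [[field_[pos_y + index_list_y[i]][pos_x + index_list_x[i]],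
--                            pos_y + index_list_y[i], pos_x + index_list_x[i]]]
--         elif field_[pos_y + index_list_y[i]][pos_x + index_list_x[i]] == lowest_risk[0][0]:
--             lowest_risk.append([field_[pos_y + index_list_y[i]][pos_x + index_list_x[i]],
--                                 pos_y + index_list_y[i], pos_x + index_list_x[i]])
--     for i in range(len(lowest_risk)):
--         lowest_risk[i] = lowest_risk[i][1:]
--
--     return lowest_risk
-- ===== SOURCE B (Python) =====
-- highest_risk = 0
--
-- def safest_pos(field_: list = None, pos_y: int = 0, pos_x: int = 0, forbid_pos: list = None):
--     # Build the full candidate pool (sentinel first, then the 4 neighbors in order),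
--     # then take the minimum once and filter, instead of a running-min-with-reset loop.
--     cands = [(highest_risk, 0, 0)]
--     for dy, dx in ((0, 1), (1, 0), (-1, 0), (0, -1)):
--         cands.append((field_[pos_y + dy][pos_x + dx], pos_y + dy, pos_x + dx))
--     m = min(v for v, _, _ in cands)
--     return [[y, x] for v, y, x in cands if v == m]
-- ===== Notes on version B (the rewrite author's own statement) =====
-- stated objective: simpler
-- what changed: Replaces A's running-min-with-reset loop over the 4 neighbors by building the full candidate pool (sentinel first) once, then a compute-min-then-filter two-pass decomposition.
import Mathlib
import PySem

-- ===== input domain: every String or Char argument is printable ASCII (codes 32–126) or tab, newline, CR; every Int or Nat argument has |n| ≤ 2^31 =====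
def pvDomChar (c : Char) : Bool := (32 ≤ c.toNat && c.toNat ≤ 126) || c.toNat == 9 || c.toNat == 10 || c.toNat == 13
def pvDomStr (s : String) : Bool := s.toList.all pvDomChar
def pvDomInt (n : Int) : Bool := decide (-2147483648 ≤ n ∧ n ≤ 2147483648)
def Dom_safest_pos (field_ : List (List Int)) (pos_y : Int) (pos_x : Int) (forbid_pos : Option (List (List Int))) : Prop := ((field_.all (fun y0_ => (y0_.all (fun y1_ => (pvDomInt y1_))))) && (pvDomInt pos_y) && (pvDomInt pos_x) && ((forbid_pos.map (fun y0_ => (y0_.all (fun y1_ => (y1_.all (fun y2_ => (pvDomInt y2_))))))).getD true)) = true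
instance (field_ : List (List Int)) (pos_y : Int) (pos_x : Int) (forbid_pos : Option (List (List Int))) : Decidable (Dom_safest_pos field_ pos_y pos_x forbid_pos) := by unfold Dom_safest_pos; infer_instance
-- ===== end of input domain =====

-- B builds the whole candidate pool first and does min-then-filter instead of A's
-- running-min-with-reset single pass; same values, order and ties (simpler decomposition).

-- field_[y][x] with Python semantics (negative index from the end; none = IndexError)
def pvCell (field_ : List (List Int)) (y x : Int) : Option Int :=
  (PySem.List.pyGet? field_ y).bind (fun row => PySem.List.pyGet? row x)

-- ===== PORT A =====
def safest_pos (field_ : List (List Int)) (pos_y : Int) (pos_x : Int) (forbid_pos : Option (List (List Int))) : List (List Int) :=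
  let index_list_y : List Int := [0, 1, -1, 0]
  let index_list_x : List Int := [1, 0, 0, -1]
  -- for i in range(len(index_list_y)): …  (none = an IndexError was raised)
  let res : Option (List (List Int)) :=
    (PySem.List.pyRange 0 4 1).foldl
      (fun acc i =>
        acc.bind fun lowest_risk =>
          let ny := pos_y + PySem.List.pyGetD index_list_y i 0
          let nx := pos_x + PySem.List.pyGetD index_list_x i 0
          match pvCell field_ ny nx with
          | none => none
          | some v =>
            -- lowest_risk[0][0]: the loop state is always a nonempty list of 3-lists
            let cur := (lowest_risk.headD []).headD 0
            if v < cur then some [[v, ny, nx]]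
            else if v = cur then some (lowest_risk ++ [[v, ny, nx]])
            else some lowest_risk)
      (some [[(0 : Int), 0, 0]])
  match res with
  | none => []   -- A raised; excluded by Pre_
  | some lowest_risk => lowest_risk.map (fun c => PySem.List.slice c (some 1) none)

-- ===== PORT B =====
def safest_pos_alt (field_ : List (List Int)) (pos_y : Int) (pos_x : Int) (forbid_pos : Option (List (List Int))) : List (List Int) :=
  -- cands = [(0,0,0)]; append one (value, y, x) per neighbor (none = IndexError)
  let cands? : Option (List (Int × Int × Int)) :=
    [((0 : Int), (1 : Int)), (1, 0), (-1, 0), (0, -1)].foldl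
      (fun acc d =>
        acc.bind fun cs =>
          (pvCell field_ (pos_y + d.1) (pos_x + d.2)).map
            (fun v => cs ++ [(v, pos_y + d.1, pos_x + d.2)]))
      (some [((0 : Int), (0 : Int), (0 : Int))])
  match cands? with
  | none => []   -- B raised; excluded by Pre_
  | some cands =>
    match PySem.List.min? (cands.map (fun c => c.1)) (fun v => v) with
    | none => []   -- unreachable: cands is nonempty
    | some m => (cands.filter (fun c => c.1 == m)).map (fun c => [c.2.1, c.2.2])

-- ===== PRECONDITION & SPEC =====
-- Pre_ excludes exactly the inputs where A raises IndexError: each of the four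
-- neighbor subscripts field_[pos_y±…][pos_x±…] must be in range (Python negative
-- indices count from the end and are allowed).
def Pre_safest_pos (field_ : List (List Int)) (pos_y : Int) (pos_x : Int) (forbid_pos : Option (List (List Int))) : Prop :=
  (pvCell field_ pos_y (pos_x + 1)).isSome = true ∧
  (pvCell field_ (pos_y + 1) pos_x).isSome = true ∧
  (pvCell field_ (pos_y - 1) pos_x).isSome = true ∧
  (pvCell field_ pos_y (pos_x - 1)).isSome = true
instance (field_ : List (List Int)) (pos_y : Int) (pos_x : Int) (forbid_pos : Option (List (List Int))) : Decidable (Pre_safest_pos field_ pos_y pos_x forbid_pos) := by unfold Pre_safest_pos; infer_instance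

def pvWitness_safest_pos : List (List Int) × Int × Int × Option (List (List Int)) :=
  ([[1, 2, 3], [4, 5, 6], [7, 8, 9]], 1, 1, none)

def Spec_safest_pos (field_ : List (List Int)) (pos_y : Int) (pos_x : Int) (forbid_pos : Option (List (List Int))) (out : List (List Int)) : Prop := out = safest_pos_alt field_ pos_y pos_x forbid_pos
instance (field_ : List (List Int)) (pos_y : Int) (pos_x : Int) (forbid_pos : Option (List (List Int))) (out : List (List Int)) : Decidable (Spec_safest_pos field_ pos_y pos_x forbid_pos out) := by unfold Spec_safest_pos; infer_instance

-- ===== CLAIM (what is proved, stated in full; the proofs are below) =====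
def Claim_equal_safest_pos : Prop := ∀ (field_ : List (List Int)) (pos_y : Int) (pos_x : Int) (forbid_pos : Option (List (List Int))), Dom_safest_pos field_ pos_y pos_x forbid_pos → Pre_safest_pos field_ pos_y pos_x forbid_pos → Spec_safest_pos field_ pos_y pos_x forbid_pos (safest_pos field_ pos_y pos_x forbid_pos)

-- ===== LEMMAS AND PROOFS =====

-- A's loop body on one candidate (value, y, x)
def pvStepA (lr : List (List Int)) (c : Int × Int × Int) : List (List Int) :=
  let cur := (lr.headD []).headD 0
  if c.1 < cur then [[c.1, c.2.1, c.2.2]]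
  else if c.1 = cur then lr ++ [[c.1, c.2.1, c.2.2]]
  else lr

theorem pv_foldl_min_le (l : List Int) (a : Int) : l.foldl min a ≤ a := by
  induction l generalizing a with
  | nil => simp
  | cons h t ih => exact le_trans (ih (min a h)) (min_le_left a h)

-- running-min-with-reset = keep exactly the candidates equal to the overall min
theorem pv_runA (cs : List (Int × Int × Int)) : ∀ (m : Int) (acc : List (List Int)),
    (acc.headD []).headD 0 = m →
    cs.foldl pvStepA acc =
      (if (cs.map (fun c => c.1)).foldl min m < m then [] else acc)
        ++ ((cs.filter (fun c => c.1 == (cs.map (fun c => c.1)).foldl min m)).map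
              (fun c => [c.1, c.2.1, c.2.2])) := by
  induction cs with
  | nil => intro m acc h; simp
  | cons c t ih =>
    intro m acc h
    obtain ⟨v, ny, nx⟩ := c
    have hle : (t.map (fun c => c.1)).foldl min (min m v) ≤ min m v :=
      pv_foldl_min_le _ _
    by_cases h1 : v < m
    · have hstep : pvStepA acc (v, ny, nx) = [[v, ny, nx]] := by
        simp only [pvStepA]; rw [h]; exact if_pos h1
      rw [List.foldl_cons, hstep, ih v [[v, ny, nx]] (by simp)]
      have hmv : min m v = v := by omega
      simp only [List.map_cons, List.foldl_cons, List.filter_cons, hmv]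
      have hM : (t.map (fun c => c.1)).foldl min v ≤ v := pv_foldl_min_le _ _
      by_cases h2 : (t.map (fun c => c.1)).foldl min v < v
      · have : ¬ ((v : Int) == (t.map (fun c => c.1)).foldl min v) = true := by
          simp; omega
        simp [h2, this, show (t.map (fun c => c.1)).foldl min v < m by omega]
      · have hveq : (t.map (fun c => c.1)).foldl min v = v := by omega
        simp [hveq, show v < m from h1]
    · by_cases h2 : v = m
      · subst h2
        have hstep : pvStepA acc (v, ny, nx) = acc ++ [[v, ny, nx]] := by
          simp only [pvStepA]; rw [h]; rw [if_neg h1, if_pos rfl]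
        have hhead : ((acc ++ [[v, ny, nx]]).headD []).headD 0 = v := by
          cases acc with
          | nil => simp
          | cons a t' => simpa using h
        rw [List.foldl_cons, hstep, ih v (acc ++ [[v, ny, nx]]) hhead]
        have hmv : min v v = v := by omega
        simp only [List.map_cons, List.foldl_cons, List.filter_cons, hmv]
        by_cases h3 : (t.map (fun c => c.1)).foldl min v < v
        · have : ¬ ((v : Int) == (t.map (fun c => c.1)).foldl min v) = true := by
            simp; omega
          simp [h3, this]
        · have hveq : (t.map (fun c => c.1)).foldl min v = v := by
            have := pv_foldl_min_le (t.map (fun c => c.1)) v; omega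
          simp [hveq]
      · have h3 : m < v := by omega
        have hstep : pvStepA acc (v, ny, nx) = acc := by
          simp only [pvStepA]; rw [h]; rw [if_neg h1, if_neg h2]
        rw [List.foldl_cons, hstep, ih m acc h]
        have hmv : min m v = m := by omega
        simp only [List.map_cons, List.foldl_cons, List.filter_cons, hmv]
        have : ¬ ((v : Int) == (t.map (fun c => c.1)).foldl min m) = true := by
          have := pv_foldl_min_le (t.map (fun c => c.1)) m; simp; omega
        simp [this]

theorem pv_bindStep (lr : List (List Int)) (v a b : Int) :
    (if v < (lr.headD []).headD 0 then some [[v, a, b]]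
     else if v = (lr.headD []).headD 0 then some (lr ++ [[v, a, b]])
     else some lr) = some (pvStepA lr (v, a, b)) := by
  simp only [pvStepA]; split_ifs <;> rfl

-- A's port, with the four neighbor values in hand, is the pvStepA fold then [1:]
theorem pv_A_eq (field_ : List (List Int)) (pos_y pos_x : Int) (fp : Option (List (List Int)))
    (v1 v2 v3 v4 : Int)
    (hv1 : pvCell field_ pos_y (pos_x + 1) = some v1)
    (hv2 : pvCell field_ (pos_y + 1) pos_x = some v2)
    (hv3 : pvCell field_ (pos_y - 1) pos_x = some v3)
    (hv4 : pvCell field_ pos_y (pos_x - 1) = some v4) :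
    safest_pos field_ pos_y pos_x fp =
      (List.foldl pvStepA [[(0:Int),0,0]]
        [(v1, pos_y, pos_x+1), (v2, pos_y+1, pos_x), (v3, pos_y-1, pos_x), (v4, pos_y, pos_x-1)]).map
        (fun c => PySem.List.slice c (some 1) none) := by
  have e0 : PySem.List.pyRange 0 4 1 = [(0:Int),1,2,3] := by decide
  have g0 : PySem.List.pyGetD [(0:Int),1,-1,0] 0 0 = 0 := by decide
  have g1 : PySem.List.pyGetD [(0:Int),1,-1,0] 1 0 = 1 := by decide
  have g2 : PySem.List.pyGetD [(0:Int),1,-1,0] 2 0 = -1 := by decide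
  have g3 : PySem.List.pyGetD [(0:Int),1,-1,0] 3 0 = 0 := by decide
  have g0' : PySem.List.pyGetD [(1:Int),0,0,-1] 0 0 = 1 := by decide
  have g1' : PySem.List.pyGetD [(1:Int),0,0,-1] 1 0 = 0 := by decide
  have g2' : PySem.List.pyGetD [(1:Int),0,0,-1] 2 0 = 0 := by decide
  have g3' : PySem.List.pyGetD [(1:Int),0,0,-1] 3 0 = -1 := by decide
  simp only [safest_pos, e0, List.foldl_cons, List.foldl_nil, g0, g1, g2, g3, g0', g1', g2', g3',
    add_zero, show ∀ z : Int, z + -1 = z - 1 from fun z => by ring,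
    hv1, hv2, hv3, hv4, Option.bind_some, pv_bindStep]

-- B's port, with the four neighbor values in hand, is filter-by-min over the pool
theorem pv_B_eq (field_ : List (List Int)) (pos_y pos_x : Int) (fp : Option (List (List Int)))
    (v1 v2 v3 v4 : Int)
    (hv1 : pvCell field_ pos_y (pos_x + 1) = some v1)
    (hv2 : pvCell field_ (pos_y + 1) pos_x = some v2)
    (hv3 : pvCell field_ (pos_y - 1) pos_x = some v3)
    (hv4 : pvCell field_ pos_y (pos_x - 1) = some v4) :
    safest_pos_alt field_ pos_y pos_x fp =
      (([((0:Int), (0:Int), (0:Int)), (v1, pos_y, pos_x+1), (v2, pos_y+1, pos_x),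
         (v3, pos_y-1, pos_x), (v4, pos_y, pos_x-1)].filter
          (fun c => c.1 == [v1, v2, v3, v4].foldl min 0)).map (fun c => [c.2.1, c.2.2])) := by
  simp only [safest_pos_alt, List.foldl_cons, List.foldl_nil,
    add_zero, show ∀ z : Int, z + -1 = z - 1 from fun z => by ring,
    hv1, hv2, hv3, hv4, Option.bind_some, Option.map_some, List.cons_append, List.nil_append,
    List.map_cons, List.map_nil, PySem.List.min?_id_cons]

theorem pv_mapslice (l : List (Int × Int × Int)) (M : Int) :
    ((l.filter (fun c => c.1 == M)).map (fun c => [c.1, c.2.1, c.2.2])).map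
        (fun c => PySem.List.slice c (some 1) none)
      = (l.filter (fun c => c.1 == M)).map (fun c => [c.2.1, c.2.2]) := by
  rw [List.map_map]
  exact List.map_congr_left (fun a _ => by simp [Function.comp, PySem.List.slice_from_one])

-- ===== VERDICT (by name: the statement is the Claim_ definition above) =====
theorem safest_pos_spec : Claim_equal_safest_pos := by
  intro field_ pos_y pos_x forbid_pos _ hpre
  obtain ⟨h1, h2, h3, h4⟩ := hpre
  obtain ⟨v1, hv1⟩ := Option.isSome_iff_exists.mp h1
  obtain ⟨v2, hv2⟩ := Option.isSome_iff_exists.mp h2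
  obtain ⟨v3, hv3⟩ := Option.isSome_iff_exists.mp h3
  obtain ⟨v4, hv4⟩ := Option.isSome_iff_exists.mp h4
  show safest_pos field_ pos_y pos_x forbid_pos = safest_pos_alt field_ pos_y pos_x forbid_pos
  rw [pv_A_eq field_ pos_y pos_x forbid_pos v1 v2 v3 v4 hv1 hv2 hv3 hv4,
      pv_B_eq field_ pos_y pos_x forbid_pos v1 v2 v3 v4 hv1 hv2 hv3 hv4,
      pv_runA _ 0 _ rfl]
  have hle : ([v1, v2, v3, v4] : List Int).foldl min 0 ≤ 0 := pv_foldl_min_le _ _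
  simp only [List.map_cons, List.map_nil]
  rw [List.map_append, pv_mapslice]
  conv_rhs => rw [List.filter_cons]
  by_cases h0 : ([v1, v2, v3, v4] : List Int).foldl min 0 = 0
  · rw [if_neg (show ¬ ([v1, v2, v3, v4] : List Int).foldl min 0 < 0 by omega),
        if_pos (show ((((0:Int), (0:Int), (0:Int)).1 == ([v1, v2, v3, v4] : List Int).foldl min 0)) = true by simp [h0])]
    rfl
  · rw [if_pos (show ([v1, v2, v3, v4] : List Int).foldl min 0 < 0 by omega),
        if_neg (show ¬ ((((0:Int), (0:Int), (0:Int)).1 == ([v1, v2, v3, v4] : List Int).foldl min 0)) = true by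
          intro h; rw [beq_iff_eq] at h; exact h0 h.symm)]
    rfl
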